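-- pv_equiv track=rewrite | github.com/BadrChoubai/CS1030 | Exams/Exam_Three/dictionary_builder.py | dictionary_builder
-- ===== SOURCE A (Python) =====
-- from typing import List
--
-- def dictionary_builder(key_values: List[tuple]) -> dict:
--     if len(key_values) == 0:
--         return None
--
--     dictionary = {}
--     for key, values in key_values:
--         if key not in dictionary:
--             dictionary[key] = values
--
--     return dictionary
-- ===== SOURCE B (Python) =====
-- def _build(key_values):
--     if not key_values:
--         return {}
--     key, values = key_values[0]
--     rest = [p for p in key_values[1:] if p[0] != key]
--     d = {key: values}
--     d.update(_build(rest))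
--     return d
--
-- def dictionary_builder(key_values):
--     if len(key_values) == 0:
--         return None
--     return _build(key_values)
-- ===== Notes on version B (the rewrite author's own statement) =====
-- stated objective: alternative
-- what changed: Replaces the membership-tested dict-filling loop by a recursion that takes the head pair and filters its key out of the tail before recursing, so duplicates never reach a membership test.
import Mathlib
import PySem

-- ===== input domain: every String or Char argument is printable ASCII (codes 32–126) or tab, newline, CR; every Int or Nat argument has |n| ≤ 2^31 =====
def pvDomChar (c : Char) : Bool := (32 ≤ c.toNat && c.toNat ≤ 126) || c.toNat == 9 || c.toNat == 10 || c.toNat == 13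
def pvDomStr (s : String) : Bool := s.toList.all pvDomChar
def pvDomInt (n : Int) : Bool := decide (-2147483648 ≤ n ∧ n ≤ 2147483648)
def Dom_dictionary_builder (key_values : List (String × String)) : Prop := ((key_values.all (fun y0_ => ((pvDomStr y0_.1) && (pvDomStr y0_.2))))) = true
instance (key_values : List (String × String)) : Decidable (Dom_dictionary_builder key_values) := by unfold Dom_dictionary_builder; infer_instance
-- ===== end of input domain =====

-- B differs from A only in structure (head-pair + filter recursion vs membership-tested loop); same value and insertion order.

-- ===== PORT A =====
-- A: loop filling a dict, inserting a pair only when the key is not yet present; None on empty input.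
def dictionary_builder (key_values : List (String × String)) : Option (List (String × String)) :=
  if key_values.length = 0 then none
  else
    some ((key_values.foldl
      (fun d p => if d.contains p.1 then d else d.insert p.1 p.2)
      (PySem.Dict.empty : PySem.Dict String String)).items)

-- ===== PORT B =====
-- B helper _build: take the head pair, drop its key from the tail, recurse; the recursive
-- result has only fresh keys, so Python's d.update(...) appends — ported as cons.
def pvBuild : List (String × String) → List (String × String)
  | [] => []
  | (k, v) :: rest => (k, v) :: pvBuild (rest.filter (fun p => p.1 ≠ k))
termination_by l => l.length
decreasing_by
  simpa using Nat.lt_succ_of_le (List.length_filter_le _ rest.attach)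

def dictionary_builder_alt (key_values : List (String × String)) : Option (List (String × String)) :=
  if key_values.length = 0 then none
  else some (pvBuild key_values)

-- ===== PRECONDITION & SPEC =====
def Spec_dictionary_builder (key_values : List (String × String)) (out : Option (List (String × String))) : Prop := out = dictionary_builder_alt key_values
instance (key_values : List (String × String)) (out : Option (List (String × String))) : Decidable (Spec_dictionary_builder key_values out) := by unfold Spec_dictionary_builder; infer_instance

-- ===== CLAIM (what is proved, stated in full; the proofs are below) =====
def Claim_equal_dictionary_builder : Prop := ∀ (key_values : List (String × String)), Dom_dictionary_builder key_values → Spec_dictionary_builder key_values (dictionary_builder key_values)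

-- ===== LEMMAS AND PROOFS =====

-- Invariant: A's loop started from any dict d appends exactly pvBuild of the pairs whose
-- keys are fresh w.r.t. d.
theorem pvFoldl_items (l : List (String × String)) (d : PySem.Dict String String) :
    (l.foldl (fun d p => if d.contains p.1 then d else d.insert p.1 p.2) d).items
      = d.items ++ pvBuild (l.filter (fun p => ¬ d.contains p.1)) := by
  induction l generalizing d with
  | nil => simp [pvBuild]
  | cons hd t ih =>
    obtain ⟨k, v⟩ := hd
    simp only [List.foldl_cons, List.filter_cons]
    by_cases hc : d.contains k
    · -- key already present: the loop skips it, and the filter drops it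
      simpa [hc] using ih d
    · have hc' : d.contains k = false := by simpa using hc
      simp only [hc', Bool.false_eq_true, if_false, decide_not, if_true, not_false_eq_true,
        decide_true]
      rw [ih (d.insert k v)]
      rw [PySem.Dict.items_insert, if_neg (by simp [hc'])]
      have hfix : t.filter (fun p => ¬ (d.insert k v).contains p.1)
          = (t.filter (fun p => ¬ d.contains p.1)).filter (fun p => p.1 ≠ k) := by
        rw [List.filter_filter]
        apply List.filter_congr
        intro p _
        by_cases hk : p.1 = k
        · simp [hk]
        · simp [PySem.Dict.contains_insert, hk]
      rw [hfix]
      simp [pvBuild]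

theorem dictionary_builder_eq (key_values : List (String × String)) :
    dictionary_builder key_values = dictionary_builder_alt key_values := by
  unfold dictionary_builder dictionary_builder_alt
  by_cases h : key_values.length = 0
  · simp [h]
  · simp only [h]
    rw [pvFoldl_items]
    simp [PySem.Dict.empty]

-- ===== VERDICT (by name: the statement is the Claim_ definition above) =====
theorem dictionary_builder_spec : Claim_equal_dictionary_builder := by
  intro kv _
  unfold Spec_dictionary_builder
  exact dictionary_builder_eq kv
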